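-- pv_equiv track=rewrite | github.com/Leedong-uk/daily-codingTest-study | jeemin/programmers/PG_완전범죄.py | solution
-- ===== SOURCE A (Python) =====
-- def solution(info, n, m):
--     INF = 10**9
--
--     # dp[b] = B 흔적이 b일 때 가능한 A 흔적의 최소값
--     dp = [INF] * m
--     dp[0] = 0
--
--     for a_cost, b_cost in info:
--         new_dp = [INF] * m  # ✅ 스킵 금지: 이번 물건을 반드시 처리해야 하므로 INF로 시작
--
--         for b in range(m):
--             if dp[b] == INF:
--                 continue
--
--             # 1) A가 훔치는 경우: A 증가, B 그대로
--             na = dp[b] + a_cost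
--             if na < n:
--                 new_dp[b] = min(new_dp[b], na)
--
--             # 2) B가 훔치는 경우: B 증가, A 그대로
--             nb = b + b_cost
--             if nb < m:
--                 new_dp[nb] = min(new_dp[nb], dp[b])
--
--         dp = new_dp
--
--     ans = min(dp)
--     return ans if ans < n else -1
-- ===== SOURCE B (Python) =====
-- def solution(info, n, m):
--     # Backward suffix DP: g[b] = minimum total A-trace needed to process the
--     # remaining items when the current B-trace is b.  Processing items in
--     # reverse, each round "pulls" the two options (A steals, or B steals if it
--     # stays under m) instead of scattering updates forward; the answer is g[0],
--     # checked once against n at the end.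
--     g = [0] * m
--     for a_cost, b_cost in reversed(info):
--         g = [min(a_cost + g[b], g[b + b_cost]) if b + b_cost < m else a_cost + g[b]
--              for b in range(m)]
--     r = g[0]
--     return r if r < n else -1
-- ===== Notes on version B (the rewrite author's own statement) =====
-- stated objective: simpler
-- what changed: A fills a forward table (min A-trace so far per B-trace level) with an INF sentinel, a per-step `na < n` prune and scatter updates into a fresh INF row; B computes the dual backward recurrence g[b] = minimum additional A-trace to process the remaining items from B-trace b, a gather comprehension over reversed(info) with no sentinel and a single final comparison of g[0] with n. …
-- outside the precondition, e.g. on solution([(2000000000, 5)], 1500000000, 3): A returns 1000000000, B returns -1; on solution([(5, 10), (-5, 10)], 3, 1): A returns -1, B returns 0; on solution([(0, -1)], 5, 3): A returns 0, B returns 0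
import Mathlib
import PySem

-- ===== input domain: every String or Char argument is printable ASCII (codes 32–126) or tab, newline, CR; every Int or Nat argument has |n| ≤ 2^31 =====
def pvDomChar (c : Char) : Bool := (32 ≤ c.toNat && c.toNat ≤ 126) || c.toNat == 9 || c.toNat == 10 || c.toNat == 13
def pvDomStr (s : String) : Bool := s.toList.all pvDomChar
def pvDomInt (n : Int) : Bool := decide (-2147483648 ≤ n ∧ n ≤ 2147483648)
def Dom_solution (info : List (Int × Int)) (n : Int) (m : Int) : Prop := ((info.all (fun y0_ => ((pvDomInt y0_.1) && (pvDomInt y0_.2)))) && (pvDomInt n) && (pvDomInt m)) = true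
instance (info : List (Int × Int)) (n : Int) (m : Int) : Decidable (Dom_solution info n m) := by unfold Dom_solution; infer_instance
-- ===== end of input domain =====

-- B replaces A's forward DP (min A-trace so far per B-trace level, with an INF sentinel,
-- a per-step `na < n` prune and scatter updates) by the dual backward recurrence
-- g[b] = minimum additional A-trace to finish the remaining items from B-trace b:
-- a gather pass over reversed(info) with a single final comparison against n (simpler).

-- ===== PORT A =====
def pvINF : Int := 10 ^ 9

-- Python `L[i] = min(L[i], v)` on the current row (negative index counts from the end;
-- out of range = IndexError, unreachable under Pre_)
def pySetMinArr (L : Array Int) (i v : Int) : Array Int :=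
  let j : Int := if i < 0 then i + L.size else i
  if 0 ≤ j ∧ j < L.size then L.setIfInBounds j.toNat (min (L.getD j.toNat 0) v) else L

-- the body of A's inner `for b in range(m)` loop (dp[b]: b ∈ range(m), in range)
def stepABodyArr (n m : Int) (p : Int × Int) (dp : Array Int) (new_dp : Array Int) (b : Int) : Array Int :=
  let v := dp.getD b.toNat pvINF
  if v == pvINF then new_dp
  else
    let nd1 := if v + p.1 < n then pySetMinArr new_dp b (v + p.1) else new_dp
    if b + p.2 < m then pySetMinArr nd1 (b + p.2) v else nd1

def stepAArr (n m : Int) (dp : Array Int) (p : Int × Int) : Array Int :=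
  (PySem.List.pyRange 0 m 1).foldl (stepABodyArr n m p dp) (List.replicate m.toNat pvINF).toArray

def solution (info : List (Int × Int)) (n : Int) (m : Int) : Int :=
  -- dp[0] = 0 raises IndexError when m ≤ 0 (excluded by Pre_)
  let dp := info.foldl (stepAArr n m) ((List.replicate m.toNat pvINF).toArray.setIfInBounds 0 0)
  let ans := match PySem.List.min? dp.toList (fun x => x) with
    | some x => x
    | none => 0   -- min([]) raises (m ≤ 0), excluded by Pre_
  if ans < n then ans else -1

-- ===== PORT B =====
-- one backward round: the list comprehension
-- `[min(a+g[b], g[b+bc]) if b+bc < m else a+g[b] for b in range(m)]`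
-- (g[b] and g[b+bc]: under Pre_ both indices are ≥ 0 and < m = g.size, where getD is exact)
def stepGArr (m : Int) (p : Int × Int) (g : Array Int) : Array Int :=
  ((PySem.List.pyRange 0 m 1).map (fun b =>
    if b + p.2 < m then min (p.1 + g.getD b.toNat 0) (g.getD (b + p.2).toNat 0)
    else p.1 + g.getD b.toNat 0)).toArray

def solution_alt (info : List (Int × Int)) (n : Int) (m : Int) : Int :=
  let g := info.reverse.foldl (fun g p => stepGArr m p g) (List.replicate m.toNat 0).toArray
  let r := g.getD 0 0   -- g[0]; m ≥ 1 under Pre_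
  if r < n then r else -1

-- ===== PRECONDITION & SPEC =====
-- Pre_ excludes m ≤ 0 (A raises IndexError at dp[0] = 0), items with a negative cost
-- (outside the problem's natural domain: negative b_cost reaches Python's negative-index
-- wraparound and can raise IndexError, negative a_cost interacts with A's per-step prune)
-- and n > 10^9 (A's INF sentinel collides with the threshold and A can return the sentinel).
def Pre_solution (info : List (Int × Int)) (n : Int) (m : Int) : Prop :=
  1 ≤ m ∧ n ≤ 10 ^ 9 ∧ ∀ p ∈ info, 0 ≤ p.1 ∧ 0 ≤ p.2
instance (info : List (Int × Int)) (n : Int) (m : Int) : Decidable (Pre_solution info n m) := by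
  unfold Pre_solution; infer_instance
def pvWitness_solution : (List (Int × Int)) × Int × Int := ([(2, 3), (1, 1), (3, 2)], 4, 4)

def Spec_solution (info : List (Int × Int)) (n : Int) (m : Int) (out : Int) : Prop := out = solution_alt info n m
instance (info : List (Int × Int)) (n : Int) (m : Int) (out : Int) : Decidable (Spec_solution info n m out) := by unfold Spec_solution; infer_instance

-- ===== CLAIM (what is proved, stated in full; the proofs are below) =====
def Claim_equal_solution : Prop := ∀ (info : List (Int × Int)) (n : Int) (m : Int), Dom_solution info n m → Pre_solution info n m → Spec_solution info n m (solution info n m)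

-- ===== LEMMAS AND PROOFS =====

-- list-level twins of the ports' array rows (the proofs run on these; toList bridges below)
def pySetMin (L : List Int) (i v : Int) : List Int :=
  let j : Int := if i < 0 then i + L.length else i
  if 0 ≤ j ∧ j < L.length then L.set j.toNat (min (L.getD j.toNat 0) v) else L

def stepABody (n m : Int) (p : Int × Int) (dp : List Int) (new_dp : List Int) (b : Int) : List Int :=
  let v := PySem.List.pyGetD dp b pvINF
  if v == pvINF then new_dp
  else
    let nd1 := if v + p.1 < n then pySetMin new_dp b (v + p.1) else new_dp
    if b + p.2 < m then pySetMin nd1 (b + p.2) v else nd1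

def stepA (n m : Int) (dp : List Int) (p : Int × Int) : List Int :=
  (PySem.List.pyRange 0 m 1).foldl (stepABody n m p dp) (List.replicate m.toNat pvINF)

def stepG (m : Int) (p : Int × Int) (g : List Int) : List Int :=
  (PySem.List.pyRange 0 m 1).map (fun b =>
    if b + p.2 < m then min (p.1 + PySem.List.pyGetD g b 0) (PySem.List.pyGetD g (b + p.2) 0)
    else p.1 + PySem.List.pyGetD g b 0)

-- array/list bridges
theorem agetD_toList (a : Array Int) (i : Nat) (d : Int) : a.getD i d = a.toList.getD i d := by
  unfold Array.getD
  by_cases h : i < a.size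
  · rw [dif_pos h, List.getD_eq_getElem a.toList d (by simpa using h)]
    simp
  · rw [dif_neg h, List.getD_eq_default a.toList d (by simpa using h)]

theorem agetD_pyGetD (a : Array Int) (i : Int) (d : Int) (h0 : 0 ≤ i) :
    a.getD i.toNat d = PySem.List.pyGetD a.toList i d := by
  rw [agetD_toList]
  exact (PySem.List.pyGetD_of_nonneg a.toList d h0).symm

theorem pySetMinArr_toList (L : Array Int) (i v : Int) :
    (pySetMinArr L i v).toList = pySetMin L.toList i v := by
  unfold pySetMinArr pySetMin
  simp only [Array.length_toList]
  split_ifs with h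
  · rw [Array.toList_setIfInBounds, agetD_toList]
  · rfl
  · rw [Array.toList_setIfInBounds, agetD_toList]
  · rfl

theorem stepABodyArr_toList (n m : Int) (p : Int × Int) (dp nd : Array Int) (b : Int)
    (hb : 0 ≤ b) :
    (stepABodyArr n m p dp nd b).toList = stepABody n m p dp.toList nd.toList b := by
  unfold stepABodyArr stepABody
  rw [agetD_pyGetD dp b pvINF hb]
  split_ifs <;> simp [pySetMinArr_toList, apply_ite Array.toList]

theorem foldABody_toList (n m : Int) (p : Int × Int) (dp : Array Int) (L : List Int)
    (hL : ∀ b ∈ L, 0 ≤ b) (nd : Array Int) :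
    (L.foldl (stepABodyArr n m p dp) nd).toList = L.foldl (stepABody n m p dp.toList) nd.toList := by
  induction L generalizing nd with
  | nil => rfl
  | cons b L ih =>
    rw [List.foldl_cons, List.foldl_cons, ih (fun x hx => hL x (by simp [hx])),
      stepABodyArr_toList n m p dp nd b (hL b (by simp))]

theorem stepAArr_toList (n m : Int) (dp : Array Int) (p : Int × Int) :
    (stepAArr n m dp p).toList = stepA n m dp.toList p := by
  unfold stepAArr stepA
  rw [foldABody_toList n m p dp _ (fun b hb => (PySem.List.mem_pyRange_one.mp hb).1)]

theorem foldA_toList (n m : Int) (info : List (Int × Int)) (a : Array Int) :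
    (info.foldl (stepAArr n m) a).toList = info.foldl (stepA n m) a.toList := by
  induction info generalizing a with
  | nil => rfl
  | cons p t ih => rw [List.foldl_cons, List.foldl_cons, ih, stepAArr_toList]

theorem stepGArr_toList (m : Int) (p : Int × Int) (g : Array Int) (hbc : 0 ≤ p.2) :
    (stepGArr m p g).toList = stepG m p g.toList := by
  unfold stepGArr stepG
  rw [List.toList_toArray]
  refine List.map_congr_left ?_
  intro b hb
  obtain ⟨h0, h1⟩ := PySem.List.mem_pyRange_one.mp hb
  rw [agetD_pyGetD g b 0 h0, agetD_pyGetD g (b + p.2) 0 (by omega)]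

theorem foldG_toList (m : Int) (L : List (Int × Int)) (hbc : ∀ p ∈ L, 0 ≤ p.2) (g : Array Int) :
    (L.foldl (fun g p => stepGArr m p g) g).toList = L.foldl (fun g p => stepG m p g) g.toList := by
  induction L generalizing g with
  | nil => rfl
  | cons p t ih =>
    rw [List.foldl_cons, List.foldl_cons, ih (fun q hq => hbc q (by simp [hq])),
      stepGArr_toList m p g (hbc p (by simp))]


-- the backward spec: F m suffix b = min total A-cost to process `suffix` from B-trace b
def Fsuf (m : Int) : List (Int × Int) → Int → Int
  | [], _ => 0
  | p :: t, b => if b + p.2 < m then min (p.1 + Fsuf m t b) (Fsuf m t (b + p.2)) else p.1 + Fsuf m t b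

theorem Fsuf_nonneg (m : Int) (t : List (Int × Int)) (ht : ∀ p ∈ t, 0 ≤ p.1) (b : Int) :
    0 ≤ Fsuf m t b := by
  induction t generalizing b with
  | nil => simp [Fsuf]
  | cons p t ih =>
    have ha := ht p (by simp)
    have iht : ∀ q ∈ t, 0 ≤ q.1 := fun q hq => ht q (by simp [hq])
    simp only [Fsuf]
    split_ifs with h
    · exact le_min (by have := ih iht b; omega) (ih iht (b + p.2))
    · have := ih iht b; omega

-- min over b ∈ range(m), seeded with INF (harmless: all relevant entries are ≤ INF)
def Mm (m : Int) (h : Int → Int) : Int := ((PySem.List.pyRange 0 m 1).map h).foldl min pvINF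

def comb (n v w : Int) : Int := if v = pvINF then pvINF else if v + w < n then v + w else pvINF
def capn (n x : Int) : Int := if x < n then x else pvINF

theorem le_foldl_min (ws : List Int) (c x : Int) (hc : x ≤ c) (hall : ∀ w ∈ ws, x ≤ w) :
    x ≤ ws.foldl min c := by
  induction ws generalizing c with
  | nil => exact hc
  | cons w ws ih =>
    rw [List.foldl_cons]
    exact ih (min c w) (le_min hc (hall w (by simp))) (fun y hy => hall y (by simp [hy]))

theorem Mm_le_INF (m : Int) (h : Int → Int) : Mm m h ≤ pvINF :=
  (PySem.List.foldl_min_le _ _).1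

theorem Mm_le_entry (m : Int) (h : Int → Int) (b : Int) (h0 : 0 ≤ b) (h1 : b < m) :
    Mm m h ≤ h b :=
  (PySem.List.foldl_min_le _ _).2 (h b)
    (List.mem_map.mpr ⟨b, PySem.List.mem_pyRange_one.mpr ⟨h0, h1⟩, rfl⟩)

theorem le_Mm (m : Int) (h : Int → Int) (x : Int) (hx : x ≤ pvINF)
    (hall : ∀ b, 0 ≤ b → b < m → x ≤ h b) : x ≤ Mm m h := by
  refine le_foldl_min _ _ _ hx ?_
  intro w hw
  rcases List.mem_map.mp hw with ⟨b, hb, rfl⟩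
  obtain ⟨h0, h1⟩ := PySem.List.mem_pyRange_one.mp hb
  exact hall b h0 h1

theorem Mm_cases (m : Int) (h : Int → Int) :
    Mm m h = pvINF ∨ ∃ b, 0 ≤ b ∧ b < m ∧ Mm m h = h b := by
  rcases PySem.List.foldl_min_mem ((PySem.List.pyRange 0 m 1).map h) pvINF with hc | hc
  · exact Or.inl hc
  · rcases List.mem_map.mp hc with ⟨b, hb, hbe⟩
    obtain ⟨h0, h1⟩ := PySem.List.mem_pyRange_one.mp hb
    exact Or.inr ⟨b, h0, h1, hbe.symm⟩

theorem Mm_le_Mm (m : Int) (h h' : Int → Int)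
    (hall : ∀ b, 0 ≤ b → b < m → Mm m h ≤ h' b) : Mm m h ≤ Mm m h' :=
  le_Mm m h' _ (Mm_le_INF m h) hall

theorem Mm_congr (m : Int) (h h' : Int → Int)
    (he : ∀ b, 0 ≤ b → b < m → h b = h' b) : Mm m h = Mm m h' := by
  unfold Mm
  congr 1
  refine List.map_congr_left ?_
  intro b hb
  obtain ⟨h0, h1⟩ := PySem.List.mem_pyRange_one.mp hb
  exact he b h0 h1

theorem comb_le_INF (n v w : Int) (hn : n ≤ pvINF) : comb n v w ≤ pvINF := by
  unfold comb; split_ifs <;> omega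

theorem capn_eq_comb_zero (n v : Int) : capn n v = comb n v 0 := by
  unfold capn comb
  by_cases hv : v = pvINF
  · simp [hv]
  · simp [hv]

-- ===== pointwise view of one A round (the scatter pass as a batch of (target, value) updates) =====
def bump (g : Int → Int) (t v : Int) : Int → Int := fun j => if j = t then min (g j) v else g j
def bumps (ps : List (Int × Int)) (g : Int → Int) : Int → Int :=
  ps.foldl (fun g q => bump g q.1 q.2) g

-- the (target, value) updates one live source state (src, v) emits for item p
def cands (n m : Int) (p : Int × Int) (src v : Int) : List (Int × Int) :=
  (if v + p.1 < n then [(src, v + p.1)] else []) ++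
  (if src + p.2 < m then [(PySem.Int.mod (src + p.2) m, v)] else [])

def allc (n m : Int) (p : Int × Int) (dp : List Int) : List (Int × Int) :=
  (PySem.List.pyRange 0 m 1).flatMap (fun src =>
    if PySem.List.pyGetD dp src pvINF == pvINF then []
    else cands n m p src (PySem.List.pyGetD dp src pvINF))

theorem bumps_nil (g : Int → Int) : bumps [] g = g := rfl

theorem bumps_cons (q : Int × Int) (ps : List (Int × Int)) (g : Int → Int) :
    bumps (q :: ps) g = bumps ps (bump g q.1 q.2) := rfl

theorem bumps_append (ps qs : List (Int × Int)) (g : Int → Int) :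
    bumps (ps ++ qs) g = bumps qs (bumps ps g) := by
  simp [bumps, List.foldl_append]

theorem bumps_eval (ps : List (Int × Int)) (g : Int → Int) (j : Int) :
    bumps ps g j = ((ps.filter (fun q => q.1 == j)).map (·.2)).foldl min (g j) := by
  induction ps generalizing g with
  | nil => rfl
  | cons q ps ih =>
    rw [bumps_cons, ih]
    by_cases h : q.1 = j
    · simp [h, bump]
    · simp [h, bump, Ne.symm h]

theorem bumps_le (ps : List (Int × Int)) (g : Int → Int) (j : Int) :
    bumps ps g j ≤ g j := by
  rw [bumps_eval]
  exact (PySem.List.foldl_min_le _ _).1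

theorem bumps_le_mem (ps : List (Int × Int)) (g : Int → Int) (j w : Int)
    (h : (j, w) ∈ ps) : bumps ps g j ≤ w := by
  rw [bumps_eval]
  exact (PySem.List.foldl_min_le _ _).2 w
    (List.mem_map.mpr ⟨(j, w), List.mem_filter.mpr ⟨h, by simp⟩, rfl⟩)

theorem bumps_attain (ps : List (Int × Int)) (g : Int → Int) (j : Int) :
    bumps ps g j = g j ∨ (j, bumps ps g j) ∈ ps := by
  rw [bumps_eval]
  rcases PySem.List.foldl_min_mem ((ps.filter (fun q => q.1 == j)).map (·.2)) (g j) with hc | hc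
  · exact Or.inl hc
  · rcases List.mem_map.mp hc with ⟨⟨q1, q2⟩, hq, hqe⟩
    rcases List.mem_filter.mp hq with ⟨hqm, hqj⟩
    right
    have hj : q1 = j := by simpa using hqj
    simp only at hqe
    rw [← hqe, ← hj]
    exact hqm

theorem bumps_congr_at (ps : List (Int × Int)) {g g' : Int → Int} (j : Int)
    (h : g j = g' j) : bumps ps g j = bumps ps g' j := by
  rw [bumps_eval, bumps_eval, h]

theorem mod_eq_self_of_range (i M : Int) (hM : 1 ≤ M) (h0 : 0 ≤ i) (h1 : i < M) :
    PySem.Int.mod i M = i := by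
  rw [PySem.Int.mod_eq_emod_of_pos (by omega), Int.emod_eq_of_lt h0 h1]

theorem wrap_eq_mod (i M : Int) (hM : 1 ≤ M) (h1 : -M ≤ i) (h2 : i < M) :
    (if i < 0 then i + M else i) = PySem.Int.mod i M := by
  rw [PySem.Int.mod_eq_emod_of_pos (by omega)]
  split_ifs with h
  · have : i % M = (i + M) % M := by
      conv_lhs => rw [show i = (i + M) + M * (-1) by ring]
      rw [Int.add_mul_emod_self_left]
    rw [this, Int.emod_eq_of_lt (by omega) (by omega)]
  · rw [Int.emod_eq_of_lt (by omega) (by omega)]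

theorem bumps_singleton (t v : Int) (g : Int → Int) :
    bumps [(t, v)] g = bump g t v := rfl

theorem bump_congr_at (t v : Int) {g g' : Int → Int} (j : Int) (h : g j = g' j) :
    bump g t v j = bump g' t v j := by
  unfold bump; rw [h]

theorem pySetMin_view (L : List Int) (i v M : Int) (hM : 1 ≤ M)
    (hlen : L.length = M.toNat) (h1 : -M ≤ i) (h2 : i < M) :
    (pySetMin L i v).length = M.toNat ∧
    ∀ j, 0 ≤ j → j < M → PySem.List.pyGetD (pySetMin L i v) j pvINF
        = bump (fun k => PySem.List.pyGetD L k pvINF) (PySem.Int.mod i M) v j := by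
  have hMl : (L.length : Int) = M := by omega
  have hw : (if i < 0 then i + (L.length : Int) else i) = PySem.Int.mod i M := by
    rw [hMl]; exact wrap_eq_mod i M hM h1 h2
  have hmod0 : 0 ≤ PySem.Int.mod i M := PySem.Int.mod_nonneg _ (by omega)
  have hmodM : PySem.Int.mod i M < M := PySem.Int.mod_lt _ (by omega)
  unfold pySetMin
  simp only [hw]
  rw [if_pos ⟨hmod0, by omega⟩]
  have htN : (PySem.Int.mod i M).toNat < L.length := by omega
  refine ⟨by simp [hlen], ?_⟩
  intro j hj0 hjM
  have hjN : j.toNat < L.length := by omega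
  have hset : j < ((L.set (PySem.Int.mod i M).toNat (min (L.getD (PySem.Int.mod i M).toNat 0) v)).length : Int) := by
    rw [List.length_set]; omega
  rw [PySem.List.pyGetD_eq_getElem _ pvINF hj0 hset, List.getElem_set]
  simp only [bump]
  rw [PySem.List.pyGetD_eq_getElem L pvINF hj0 (by omega : j < (L.length : Int))]
  by_cases hjt : j = PySem.Int.mod i M
  · rw [if_pos (by omega), if_pos hjt, List.getD_eq_getElem L 0 htN]
    have hnat : (PySem.Int.mod i M).toNat = j.toNat := by omega
    simp [hnat]
  · rw [if_neg (by omega), if_neg hjt]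

theorem stepABody_dead (n m : Int) (p : Int × Int) (dp nd : List Int) (b : Int)
    (hv : PySem.List.pyGetD dp b pvINF = pvINF) : stepABody n m p dp nd b = nd := by
  unfold stepABody; simp [hv]

theorem stepABody_live (n m : Int) (p : Int × Int) (dp nd : List Int) (b : Int)
    (hv : PySem.List.pyGetD dp b pvINF ≠ pvINF) :
    stepABody n m p dp nd b =
      (if b + p.2 < m then
        pySetMin (if PySem.List.pyGetD dp b pvINF + p.1 < n
                  then pySetMin nd b (PySem.List.pyGetD dp b pvINF + p.1) else nd)
          (b + p.2) (PySem.List.pyGetD dp b pvINF)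
       else (if PySem.List.pyGetD dp b pvINF + p.1 < n
             then pySetMin nd b (PySem.List.pyGetD dp b pvINF + p.1) else nd)) := by
  unfold stepABody; simp [hv]

theorem foldA_view (n m : Int) (p : Int × Int) (dp : List Int) (hm : 1 ≤ m) (hb : -m ≤ p.2)
    (L : List Int) (hL : ∀ b ∈ L, 0 ≤ b ∧ b < m) (nd : List Int) (hlen : nd.length = m.toNat) :
    (L.foldl (stepABody n m p dp) nd).length = m.toNat ∧
    ∀ j, 0 ≤ j → j < m →
      PySem.List.pyGetD (L.foldl (stepABody n m p dp) nd) j pvINF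
        = bumps (L.flatMap (fun src =>
            if PySem.List.pyGetD dp src pvINF == pvINF then []
            else cands n m p src (PySem.List.pyGetD dp src pvINF)))
            (fun k => PySem.List.pyGetD nd k pvINF) j := by
  induction L generalizing nd with
  | nil => exact ⟨hlen, fun j _ _ => rfl⟩
  | cons b L ih =>
    obtain ⟨hb0, hbm⟩ := hL b (by simp)
    rw [List.foldl_cons, List.flatMap_cons]
    by_cases hv : PySem.List.pyGetD dp b pvINF = pvINF
    · rw [stepABody_dead n m p dp nd b hv]
      have hhead : (if PySem.List.pyGetD dp b pvINF == pvINF then ([] : List (Int × Int))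
          else cands n m p b (PySem.List.pyGetD dp b pvINF)) = [] := by simp [hv]
      rw [hhead]
      obtain ⟨ihl, ihv⟩ := ih (fun x hx => hL x (by simp [hx])) nd hlen
      exact ⟨ihl, fun j hj0 hjm => by rw [ihv j hj0 hjm]; rfl⟩
    · rw [stepABody_live n m p dp nd b hv]
      have hhead : (if PySem.List.pyGetD dp b pvINF == pvINF then ([] : List (Int × Int))
          else cands n m p b (PySem.List.pyGetD dp b pvINF))
          = cands n m p b (PySem.List.pyGetD dp b pvINF) := by simp [hv]
      rw [hhead]
      set v := PySem.List.pyGetD dp b pvINF with hvdef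
      set nd1 := if v + p.1 < n then pySetMin nd b (v + p.1) else nd with hnd1
      have h1 : nd1.length = m.toNat ∧ ∀ j, 0 ≤ j → j < m →
          PySem.List.pyGetD nd1 j pvINF
            = bumps (if v + p.1 < n then [(b, v + p.1)] else [])
                (fun k => PySem.List.pyGetD nd k pvINF) j := by
        rw [hnd1]
        split_ifs with hc
        · obtain ⟨hl, hview⟩ := pySetMin_view nd b (v + p.1) m hm hlen (by omega) hbm
          refine ⟨hl, fun j hj0 hjm => ?_⟩
          rw [hview j hj0 hjm, mod_eq_self_of_range b m hm hb0 hbm]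
          rfl
        · exact ⟨hlen, fun j _ _ => rfl⟩
      set nd2 := if b + p.2 < m then pySetMin nd1 (b + p.2) v else nd1 with hnd2
      have h2 : nd2.length = m.toNat ∧ ∀ j, 0 ≤ j → j < m →
          PySem.List.pyGetD nd2 j pvINF
            = bumps (cands n m p b v) (fun k => PySem.List.pyGetD nd k pvINF) j := by
        constructor
        · rw [hnd2]
          split_ifs with hc
          · exact (pySetMin_view nd1 (b + p.2) v m hm h1.1 (by omega) hc).1
          · exact h1.1
        · intro j hj0 hjm
          unfold cands
          rw [bumps_append, hnd2]
          by_cases hc : b + p.2 < m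
          · rw [if_pos hc, if_pos hc]
            obtain ⟨hl, hview⟩ := pySetMin_view nd1 (b + p.2) v m hm h1.1 (by omega) hc
            rw [hview j hj0 hjm, bumps_singleton]
            exact bump_congr_at _ _ j (h1.2 j hj0 hjm)
          · rw [if_neg hc, if_neg hc, bumps_nil]
            exact h1.2 j hj0 hjm
      obtain ⟨ihl, ihv⟩ := ih (fun x hx => hL x (by simp [hx])) nd2 h2.1
      refine ⟨ihl, fun j hj0 hjm => ?_⟩
      rw [ihv j hj0 hjm, bumps_append]
      exact bumps_congr_at _ j (h2.2 j hj0 hjm)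

theorem replicate_INF_getD (m : Int) (j : Int) (hj0 : 0 ≤ j) (hjm : j < m) :
    PySem.List.pyGetD (List.replicate m.toNat pvINF) j pvINF = pvINF := by
  rw [PySem.List.pyGetD_eq_getElem _ pvINF hj0 (by simp; omega)]
  exact List.getElem_replicate _

-- dp' = stepA dp p, pointwise: length, and value = min over the candidate updates (base INF)
theorem stepA_view (n m : Int) (p : Int × Int) (dp : List Int) (hm : 1 ≤ m) (hb : -m ≤ p.2) :
    (stepA n m dp p).length = m.toNat ∧
    ∀ j, 0 ≤ j → j < m →
      PySem.List.pyGetD (stepA n m dp p) j pvINF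
        = bumps (allc n m p dp) (fun _ => pvINF) j := by
  obtain ⟨hl, hv⟩ := foldA_view n m p dp hm hb (PySem.List.pyRange 0 m 1)
    (fun b hb => PySem.List.mem_pyRange_one.mp hb) _ List.length_replicate
  refine ⟨hl, fun j hj0 hjm => ?_⟩
  rw [show stepA n m dp p = (PySem.List.pyRange 0 m 1).foldl (stepABody n m p dp)
      (List.replicate m.toNat pvINF) from rfl, hv j hj0 hjm]
  exact bumps_congr_at _ j (replicate_INF_getD m j hj0 hjm)

-- membership in the candidate stream, with the modulus simplified away (p.2 ≥ 0)
theorem mem_allc (n m : Int) (p : Int × Int) (dp : List Int) (hm : 1 ≤ m) (hbc : 0 ≤ p.2)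
    (q : Int × Int) :
    q ∈ allc n m p dp ↔ ∃ b, 0 ≤ b ∧ b < m ∧ PySem.List.pyGetD dp b pvINF ≠ pvINF ∧
      ((q = (b, PySem.List.pyGetD dp b pvINF + p.1) ∧ PySem.List.pyGetD dp b pvINF + p.1 < n) ∨
       (q = (b + p.2, PySem.List.pyGetD dp b pvINF) ∧ b + p.2 < m)) := by
  unfold allc
  rw [List.mem_flatMap]
  constructor
  · rintro ⟨b, hb, hq⟩
    obtain ⟨h0, h1⟩ := PySem.List.mem_pyRange_one.mp hb
    by_cases hv : PySem.List.pyGetD dp b pvINF = pvINF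
    · simp [hv] at hq
    · rw [if_neg (by simpa using hv)] at hq
      unfold cands at hq
      rcases List.mem_append.mp hq with h | h
      · by_cases hc : PySem.List.pyGetD dp b pvINF + p.1 < n
        · rw [if_pos hc] at h
          simp only [List.mem_singleton] at h
          exact ⟨b, h0, h1, hv, Or.inl ⟨h, hc⟩⟩
        · rw [if_neg hc] at h; simp at h
      · by_cases hc : b + p.2 < m
        · rw [if_pos hc] at h
          simp only [List.mem_singleton] at h
          rw [mod_eq_self_of_range (b + p.2) m hm (by omega) hc] at h
          exact ⟨b, h0, h1, hv, Or.inr ⟨h, hc⟩⟩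
        · rw [if_neg hc] at h; simp at h
  · rintro ⟨b, h0, h1, hv, hcase⟩
    refine ⟨b, PySem.List.mem_pyRange_one.mpr ⟨h0, h1⟩, ?_⟩
    rw [if_neg (by simpa using hv)]
    unfold cands
    rcases hcase with ⟨hq, hc⟩ | ⟨hq, hc⟩
    · exact List.mem_append.mpr (Or.inl (by rw [if_pos hc, hq]; simp))
    · refine List.mem_append.mpr (Or.inr ?_)
      rw [if_pos hc, mod_eq_self_of_range (b + p.2) m hm (by omega) hc, hq]
      simp

-- ===== the one-round min exchange =====
theorem exchange (n m : Int) (p : Int × Int) (t : List (Int × Int)) (dp : List Int)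
    (hm : 1 ≤ m) (hn : n ≤ pvINF) (hbc : 0 ≤ p.2)
    (hF : ∀ b, 0 ≤ Fsuf m t b) :
    Mm m (fun j => comb n (PySem.List.pyGetD (stepA n m dp p) j pvINF) (Fsuf m t j))
      = Mm m (fun b => comb n (PySem.List.pyGetD dp b pvINF) (Fsuf m (p :: t) b)) := by
  obtain ⟨hlen', hview⟩ := stepA_view n m p dp hm (by omega)
  have hINFne : ∀ x : Int, x < n → x ≠ pvINF := fun x hx => by unfold pvINF at *; omega
  apply le_antisymm
  · -- ∀ b : LHS-min ≤ comb (dpv b) (F (p::t) b)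
    apply Mm_le_Mm
    intro b h0 h1
    by_cases hv : PySem.List.pyGetD dp b pvINF = pvINF
    · rw [show comb n (PySem.List.pyGetD dp b pvINF) (Fsuf m (p :: t) b) = pvINF by
        unfold comb; rw [if_pos hv]]
      exact Mm_le_INF m _
    · set v := PySem.List.pyGetD dp b pvINF with hvdef
      by_cases hs : v + Fsuf m (p :: t) b < n
      · rw [show comb n v (Fsuf m (p :: t) b) = v + Fsuf m (p :: t) b by
          unfold comb; rw [if_neg hv, if_pos hs]]
        -- find the realizing branch of F
        have hcaseA : v + p.1 + Fsuf m t b < n →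
            Mm m (fun j => comb n (PySem.List.pyGetD (stepA n m dp p) j pvINF) (Fsuf m t j))
              ≤ v + p.1 + Fsuf m t b := by
          intro hsum
          have hva : v + p.1 < n := by have := hF b; omega
          have hmem : (b, v + p.1) ∈ allc n m p dp :=
            (mem_allc n m p dp hm hbc _).mpr ⟨b, h0, h1, hv, Or.inl ⟨rfl, hva⟩⟩
          have hle : PySem.List.pyGetD (stepA n m dp p) b pvINF ≤ v + p.1 := by
            rw [hview b h0 h1]; exact bumps_le_mem _ _ _ _ hmem
          refine le_trans (Mm_le_entry m _ b h0 h1) ?_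
          have hne : PySem.List.pyGetD (stepA n m dp p) b pvINF ≠ pvINF := by
            have := hINFne (v + p.1) hva; unfold pvINF at *; omega
          unfold comb
          rw [if_neg hne, if_pos (by have := hF b; omega)]
          have := hF b; omega
        by_cases hg : b + p.2 < m
        · have hFc : Fsuf m (p :: t) b = min (p.1 + Fsuf m t b) (Fsuf m t (b + p.2)) := by
            simp [Fsuf, hg]
          rcases le_total (p.1 + Fsuf m t b) (Fsuf m t (b + p.2)) with hmin | hmin
          · rw [hFc, min_eq_left hmin] at hs ⊢
            have := hcaseA (by omega); omega
          · rw [hFc, min_eq_right hmin] at hs ⊢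
            -- B-candidate at target b + p.2
            have hmem : (b + p.2, v) ∈ allc n m p dp :=
              (mem_allc n m p dp hm hbc _).mpr ⟨b, h0, h1, hv, Or.inr ⟨rfl, hg⟩⟩
            have hle : PySem.List.pyGetD (stepA n m dp p) (b + p.2) pvINF ≤ v := by
              rw [hview (b + p.2) (by omega) hg]; exact bumps_le_mem _ _ _ _ hmem
            refine le_trans (Mm_le_entry m _ (b + p.2) (by omega) hg) ?_
            have hvn : v < n := by have := hF (b + p.2); omega
            have hne : PySem.List.pyGetD (stepA n m dp p) (b + p.2) pvINF ≠ pvINF := by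
              have := hINFne v hvn; unfold pvINF at *; omega
            unfold comb
            rw [if_neg hne, if_pos (by have := hF (b + p.2); omega)]
            have := hF (b + p.2); omega
        · have hFc : Fsuf m (p :: t) b = p.1 + Fsuf m t b := by simp [Fsuf, hg]
          rw [hFc] at hs ⊢
          have := hcaseA (by omega); omega
      · rw [show comb n v (Fsuf m (p :: t) b) = pvINF by
          unfold comb; rw [if_neg hv, if_neg hs]]
        exact Mm_le_INF m _
  · -- ∀ j : RHS-min ≤ comb (dp'v j) (F t j)
    apply Mm_le_Mm
    intro j h0 h1
    by_cases hv' : PySem.List.pyGetD (stepA n m dp p) j pvINF = pvINF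
    · rw [show comb n (PySem.List.pyGetD (stepA n m dp p) j pvINF) (Fsuf m t j) = pvINF by
        unfold comb; rw [if_pos hv']]
      exact Mm_le_INF m _
    · set w := PySem.List.pyGetD (stepA n m dp p) j pvINF with hwdef
      by_cases hlt : w + Fsuf m t j < n
      · rw [show comb n w (Fsuf m t j) = w + Fsuf m t j by
          unfold comb; rw [if_neg hv', if_pos hlt]]
        -- w is attained by some candidate (j, w)
        have hatt : (j, w) ∈ allc n m p dp := by
          rw [hwdef, hview j h0 h1] at hv' ⊢
          rcases bumps_attain (allc n m p dp) (fun _ => pvINF) j with hc | hc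
          · exact absurd hc hv'
          · exact hc
        rcases (mem_allc n m p dp hm hbc _).mp hatt with ⟨b, hb0, hb1, hlv, hcase⟩
        set v := PySem.List.pyGetD dp b pvINF with hvdef
        rcases hcase with ⟨hq, hva⟩ | ⟨hq, hg⟩
        · -- A-candidate: j = b, w = v + p.1
          have hj : j = b := congrArg Prod.fst hq
          have hw : w = v + p.1 := congrArg Prod.snd hq
          have hFle : Fsuf m (p :: t) b ≤ p.1 + Fsuf m t b := by
            by_cases hg : b + p.2 < m
            · simp [Fsuf, hg]
            · simp [Fsuf, hg]
          refine le_trans (Mm_le_entry m _ b hb0 hb1) ?_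
          unfold comb
          rw [if_neg hlv, if_pos (by rw [hj, hw] at hlt; omega)]
          rw [hj, hw] at hlt ⊢; omega
        · -- B-candidate: j = b + p.2, w = v
          have hj : j = b + p.2 := congrArg Prod.fst hq
          have hw : w = v := congrArg Prod.snd hq
          have hFle : Fsuf m (p :: t) b ≤ Fsuf m t (b + p.2) := by
            simp [Fsuf, hg]
          refine le_trans (Mm_le_entry m _ b hb0 hb1) ?_
          unfold comb
          rw [if_neg hlv, if_pos (by rw [hj, hw] at hlt; omega)]
          rw [hj, hw] at hlt ⊢; omega
      · rw [show comb n w (Fsuf m t j) = pvINF by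
          unfold comb; rw [if_neg hv', if_neg hlt]]
        exact Mm_le_INF m _

-- ===== the forward fold, capped, equals the comb of the backward spec =====
theorem keyA (n m : Int) (hm : 1 ≤ m) (hn : n ≤ pvINF) (suffix : List (Int × Int))
    (hs : ∀ p ∈ suffix, 0 ≤ p.1 ∧ 0 ≤ p.2) (dp : List Int) (hlen : dp.length = m.toNat) :
    Mm m (fun b => capn n (PySem.List.pyGetD (suffix.foldl (stepA n m) dp) b pvINF))
      = Mm m (fun b => comb n (PySem.List.pyGetD dp b pvINF) (Fsuf m suffix b)) := by
  induction suffix generalizing dp with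
  | nil =>
    exact Mm_congr m _ _ (fun b _ _ => by
      show capn n _ = comb n _ (Fsuf m [] b)
      rw [show Fsuf m [] b = 0 from rfl]
      exact capn_eq_comb_zero n _)
  | cons p t ih =>
    have hp := hs p (by simp)
    have hlen' : (stepA n m dp p).length = m.toNat :=
      (stepA_view n m p dp hm (by omega)).1
    rw [List.foldl_cons, ih (fun q hq => hs q (by simp [hq])) _ hlen']
    exact exchange n m p t dp hm hn hp.2
      (fun b => Fsuf_nonneg m t (fun q hq => (hs q (by simp [hq])).1) b)

-- entries of the final forward table are ≤ INF
theorem fold_ub (n m : Int) (hm : 1 ≤ m) (info : List (Int × Int))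
    (hcost : ∀ p ∈ info, 0 ≤ p.2) (dp : List Int)
    (hlen : dp.length = m.toNat)
    (hub : ∀ b, 0 ≤ b → b < m → PySem.List.pyGetD dp b pvINF ≤ pvINF) :
    (info.foldl (stepA n m) dp).length = m.toNat ∧
    ∀ b, 0 ≤ b → b < m → PySem.List.pyGetD (info.foldl (stepA n m) dp) b pvINF ≤ pvINF := by
  induction info generalizing dp with
  | nil => exact ⟨hlen, hub⟩
  | cons p t ih =>
    have hp2 := hcost p (by simp)
    obtain ⟨hl, hv⟩ := stepA_view n m p dp hm (by omega)
    rw [List.foldl_cons]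
    exact ih (fun q hq => hcost q (by simp [hq])) _ hl
      (fun b h0 h1 => by rw [hv b h0 h1]; exact bumps_le _ _ b)

-- the initial A row, pointwise
theorem init_getD (m : Int) (hm : 1 ≤ m) (b : Int) (h0 : 0 ≤ b) (h1 : b < m) :
    PySem.List.pyGetD ((List.replicate m.toNat pvINF).set 0 0) b pvINF
      = if b = 0 then 0 else pvINF := by
  have hlen : ((List.replicate m.toNat pvINF).set 0 0).length = m.toNat := by simp
  rw [PySem.List.pyGetD_eq_getElem _ pvINF h0 (by rw [hlen]; omega), List.getElem_set]
  by_cases hb : b = 0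
  · rw [if_pos (by omega), if_pos hb]
  · rw [if_neg (by omega), if_neg hb, List.getElem_replicate]

-- Python min(dp) equals Mm of the pointwise view when all entries are ≤ INF
theorem min?_eq_Mm (m : Int) (hm : 1 ≤ m) (dp : List Int) (hlen : dp.length = m.toNat)
    (hub : ∀ b, 0 ≤ b → b < m → PySem.List.pyGetD dp b pvINF ≤ pvINF) :
    PySem.List.min? dp (fun x => x)
      = some (Mm m (fun b => PySem.List.pyGetD dp b pvINF)) := by
  cases dp with
  | nil => simp at hlen; omega
  | cons x tl =>
    rw [PySem.List.min?_id_cons]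
    congr 1
    set r := tl.foldl min x with hr
    have hrmem : r ∈ x :: tl := by
      rcases PySem.List.foldl_min_mem tl x with hc | hc
      · rw [hr, hc]; simp
      · rw [hr]; right; exact hc
    have hrle : ∀ y ∈ x :: tl, r ≤ y := by
      intro y hy
      rcases List.mem_cons.mp hy with hy | hy
      · rw [hy]; exact (PySem.List.foldl_min_le tl x).1
      · exact (PySem.List.foldl_min_le tl x).2 y hy
    apply le_antisymm
    · -- r ≤ Mm
      refine le_Mm m _ r ?_ ?_
      · rcases List.getElem_of_mem hrmem with ⟨k, hk, hdk⟩
        have hk' : (k : Int) < m := by omega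
        have := hub k (by omega) hk'
        rw [PySem.List.pyGetD_eq_getElem _ pvINF (by omega) (by omega)] at this
        simpa [hdk] using this
      · intro b h0 h1
        refine hrle _ ?_
        rw [PySem.List.pyGetD_eq_getElem _ pvINF h0 (by omega)]
        exact List.getElem_mem _
    · -- Mm ≤ r
      rcases List.getElem_of_mem hrmem with ⟨k, hk, hdk⟩
      have hk' : (k : Int) < m := by omega
      have : PySem.List.pyGetD (x :: tl) (k : Int) pvINF = r := by
        rw [PySem.List.pyGetD_eq_getElem _ pvINF (by omega) (by omega)]
        simpa using hdk
      rw [← this]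
      exact Mm_le_entry m _ k (by omega) hk'

-- capping does not change the returned value
theorem cap_branch (n m : Int) (hn : n ≤ pvINF) (h : Int → Int)
    (hub : ∀ b, 0 ≤ b → b < m → h b ≤ pvINF) :
    (if Mm m h < n then Mm m h else -1)
      = (if Mm m (fun b => capn n (h b)) < n then Mm m (fun b => capn n (h b)) else -1) := by
  have hcapge : ∀ b, 0 ≤ b → b < m → h b ≤ capn n (h b) := by
    intro b h0 h1; unfold capn; split_ifs with hc
    · exact le_refl _
    · exact hub b h0 h1
  have hle : Mm m h ≤ Mm m (fun b => capn n (h b)) :=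
    Mm_le_Mm m _ _ (fun b h0 h1 => le_trans (Mm_le_entry m h b h0 h1) (hcapge b h0 h1))
  by_cases hlt : Mm m h < n
  · -- the min is attained below n, so capping fixes it
    have : Mm m (fun b => capn n (h b)) = Mm m h := by
      rcases Mm_cases m h with hc | ⟨b, h0, h1, hc⟩
      · rw [hc] at hlt; unfold pvINF at *; omega
      · apply le_antisymm _ hle
        refine le_trans (Mm_le_entry m _ b h0 h1) ?_
        show capn n (h b) ≤ Mm m h
        rw [show capn n (h b) = h b by unfold capn; rw [if_pos (by omega : h b < n)], hc]
    rw [if_pos hlt, if_pos (by omega), this]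
  · have : ¬ Mm m (fun b => capn n (h b)) < n := by
      rcases Mm_cases m (fun b => capn n (h b)) with hc | ⟨b, h0, h1, hc⟩
      · rw [hc]; unfold pvINF at *; omega
      · rw [hc]
        show ¬ capn n (h b) < n
        unfold capn
        split_ifs with hcb
        · have := Mm_le_entry m h b h0 h1; omega
        · omega
    rw [if_neg hlt, if_neg this]

-- the backward pass computes Fsuf pointwise
theorem gB (m : Int) (info : List (Int × Int))
    (hbc : ∀ p ∈ info, 0 ≤ p.2) (b : Int) (h0 : 0 ≤ b) (h1 : b < m) :
    PySem.List.pyGetD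
        (info.reverse.foldl (fun g p => stepG m p g) (List.replicate m.toNat 0)) b 0
      = Fsuf m info b := by
  rw [List.foldl_reverse]
  induction info generalizing b with
  | nil =>
    show PySem.List.pyGetD (List.replicate m.toNat 0) b 0 = 0
    rw [PySem.List.pyGetD_eq_getElem _ 0 h0 (by simp; omega)]
    exact List.getElem_replicate _
  | cons p t ih =>
    rw [List.foldr_cons]
    set G := List.foldr (fun x y => stepG m x y) (List.replicate m.toNat 0) t with hG
    rw [show stepG m p G = (PySem.List.pyRange 0 m 1).map (fun b =>
        if b + p.2 < m then min (p.1 + PySem.List.pyGetD G b 0) (PySem.List.pyGetD G (b + p.2) 0)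
        else p.1 + PySem.List.pyGetD G b 0) from rfl]
    rw [PySem.List.pyGetD_map_pyRange_of_nonneg _ m b 0 h0 h1]
    have hp2 := hbc p (by simp)
    have iht : ∀ q ∈ t, 0 ≤ q.2 := fun q hq => hbc q (by simp [hq])
    by_cases hg : b + p.2 < m
    · rw [if_pos hg, ih iht b h0 h1, ih iht (b + p.2) (by omega) hg]
      simp [Fsuf, hg]
    · rw [if_neg hg, ih iht b h0 h1]
      simp [Fsuf, hg]

-- ===== VERDICT =====
theorem solution_spec : Claim_equal_solution := by
  intro info n m _ hpre
  obtain ⟨hm, hn, hcosts⟩ := hpre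
  have hn' : n ≤ pvINF := by unfold pvINF; omega
  unfold Spec_solution solution solution_alt
  simp only []
  -- bridge the array-backed rows of the ports to their list-level twins
  have hAdp : (info.foldl (stepAArr n m)
        ((List.replicate m.toNat pvINF).toArray.setIfInBounds 0 0)).toList
      = info.foldl (stepA n m) ((List.replicate m.toNat pvINF).set 0 0) := by
    rw [foldA_toList, Array.toList_setIfInBounds, List.toList_toArray]
  have hBg : (info.reverse.foldl (fun g p => stepGArr m p g)
        (List.replicate m.toNat 0).toArray).toList
      = info.reverse.foldl (fun g p => stepG m p g) (List.replicate m.toNat 0) := by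
    rw [foldG_toList m info.reverse (fun p hp => (hcosts p (List.mem_reverse.mp hp)).2),
      List.toList_toArray]
  rw [hAdp]
  have hB0 : ∀ (a : Array Int), a.getD 0 0 = PySem.List.pyGetD a.toList 0 0 :=
    fun a => agetD_pyGetD a 0 0 (le_refl 0)
  rw [hB0, hBg]
  -- A side: the final table, its min, capped
  have hinit_len : ((List.replicate m.toNat pvINF).set 0 0).length = m.toNat := by simp
  have hinit_ub : ∀ b, 0 ≤ b → b < m →
      PySem.List.pyGetD ((List.replicate m.toNat pvINF).set 0 0) b pvINF ≤ pvINF := by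
    intro b h0 h1
    rw [init_getD m hm b h0 h1]
    split_ifs
    · unfold pvINF; norm_num
    · exact le_refl _
  obtain ⟨hflen, hfub⟩ := fold_ub n m hm info (fun p hp => (hcosts p hp).2) _ hinit_len hinit_ub
  rw [min?_eq_Mm m hm _ hflen hfub]
  -- the branch with the capped min
  rw [show (if Mm m (fun b => PySem.List.pyGetD (info.foldl (stepA n m)
        ((List.replicate m.toNat pvINF).set 0 0)) b pvINF) < n
      then Mm m (fun b => PySem.List.pyGetD (info.foldl (stepA n m)
        ((List.replicate m.toNat pvINF).set 0 0)) b pvINF) else -1)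
    = (if Mm m (fun b => capn n (PySem.List.pyGetD (info.foldl (stepA n m)
        ((List.replicate m.toNat pvINF).set 0 0)) b pvINF)) < n
      then Mm m (fun b => capn n (PySem.List.pyGetD (info.foldl (stepA n m)
        ((List.replicate m.toNat pvINF).set 0 0)) b pvINF)) else -1)
    from cap_branch n m hn' _ hfub]
  rw [keyA n m hm hn' info hcosts _ hinit_len]
  -- evaluate the RHS min: only b = 0 is live initially
  have hentry : ∀ b, 0 ≤ b → b < m →
      comb n (PySem.List.pyGetD ((List.replicate m.toNat pvINF).set 0 0) b pvINF) (Fsuf m info b)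
        = if b = 0 then comb n 0 (Fsuf m info 0) else pvINF := by
    intro b h0 h1
    rw [init_getD m hm b h0 h1]
    by_cases hb : b = 0
    · rw [if_pos hb, if_pos hb, hb]
    · rw [if_neg hb, if_neg hb]
      unfold comb; rw [if_pos rfl]
  have hMm : Mm m (fun b => comb n (PySem.List.pyGetD
        ((List.replicate m.toNat pvINF).set 0 0) b pvINF) (Fsuf m info b))
      = comb n 0 (Fsuf m info 0) := by
    apply le_antisymm
    · refine le_trans (Mm_le_entry m _ 0 (le_refl 0) (by omega)) ?_
      rw [hentry 0 (le_refl 0) (by omega), if_pos rfl]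
    · refine le_Mm m _ _ (comb_le_INF n 0 _ hn') ?_
      intro b h0 h1
      rw [hentry b h0 h1]
      split_ifs with hb
      · exact le_refl _
      · exact comb_le_INF n 0 _ hn'
  rw [hMm]
  -- B side
  rw [gB m info (fun p hp => (hcosts p hp).2) 0 (le_refl 0) (by omega)]
  -- finish: comb n 0 F = if F < n then F else INF
  have h0INF : (0 : Int) ≠ pvINF := by unfold pvINF; norm_num
  unfold comb
  rw [if_neg h0INF]
  split_ifs <;> first | rfl | omega
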